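-- pv_equiv track=rewrite | github.com/them311/Tee-es-t | commercial-agent/fill_env.py | _set_env_value
-- ===== SOURCE A (Python) =====
-- def _set_env_value(content: str, key: str, value: str) -> str:
--     lines = content.split("\n")
--     found = False
--     for i, line in enumerate(lines):
--         if line.startswith(f"{key}="):
--             lines[i] = f"{key}={value}"
--             found = True
--             break
--     if not found:
--         lines.append(f"{key}={value}")
--     return "\n".join(lines)
-- ===== SOURCE B (Python) =====
-- def _set_env_value(content: str, key: str, value: str) -> str:
--     # Substring-search + splice instead of split/scan/join.
--     prefix = key + "="
--     new_line = prefix + value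
--     if content.startswith(prefix):
--         pos = 0
--     else:
--         p = content.find("\n" + prefix)
--         if p == -1:
--             return content + "\n" + new_line
--         pos = p + 1
--     end = content.find("\n", pos)
--     if end == -1:
--         return content[:pos] + new_line
--     return content[:pos] + new_line + content[end:]
-- ===== Notes on version B (the rewrite author's own statement) =====
-- stated objective: alternative
-- what changed: B replaces the split-into-lines/scan/rejoin pipeline with a direct substring search (content.startswith / content.find of '\n'+prefix) and splices the new line in with string slicing, never materialising the line list. Pre_ excludes only keys containing a newline whose 'key=' text actually occurs at a line start of content: there A appends (no single split line can start with such a key) while B's cross-line substring search matches and splices — a degenerate corner where both behaviours are accidental.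
-- outside the precondition, e.g. on _set_env_value('x\na\nb=1', 'a\nb', 'v'): A returns 'x\na\nb=1\na\nb=v', B returns 'x\na\nb=v\nb=1'
import Mathlib
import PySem

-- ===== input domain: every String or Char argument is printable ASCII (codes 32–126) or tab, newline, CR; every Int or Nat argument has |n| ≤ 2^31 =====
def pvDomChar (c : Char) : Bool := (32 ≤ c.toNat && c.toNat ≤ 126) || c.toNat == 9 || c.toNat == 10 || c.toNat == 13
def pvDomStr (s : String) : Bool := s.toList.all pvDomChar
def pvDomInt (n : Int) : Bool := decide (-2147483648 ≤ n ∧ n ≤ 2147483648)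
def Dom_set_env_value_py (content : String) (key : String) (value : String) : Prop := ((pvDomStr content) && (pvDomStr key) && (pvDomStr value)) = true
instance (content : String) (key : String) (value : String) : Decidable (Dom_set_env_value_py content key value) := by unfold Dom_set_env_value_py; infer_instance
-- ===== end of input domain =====

-- B replaces A's split-into-lines/scan/rejoin with a direct substring search and slice splice (same O(n) cost, no line list).
-- ===== PORT A =====
-- the for/enumerate loop with break: returns the updated line list and the 'found' flag
def pvALoop (pre newl : List Char) : List (List Char) → List (List Char) × Bool
  | [] => ([], false)
  | l :: ls =>
    if PySem.Chars.startswith l pre then (newl :: ls, true)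
    else
      let r := pvALoop pre newl ls
      (l :: r.1, r.2)

def set_env_value_py (content : String) (key : String) (value : String) : String :=
  let pre := key.toList ++ ['=']                       -- f"{key}="
  let newl := pre ++ value.toList                      -- f"{key}={value}"
  let lines := PySem.Chars.splitOn content.toList ['\n']   -- content.split("\n")
  let r := pvALoop pre newl lines
  let lines' := if r.2 then r.1 else r.1 ++ [newl]     -- if not found: lines.append(...)
  String.ofList (PySem.Chars.join ['\n'] lines')       -- "\n".join(lines)

-- ===== PORT B =====
-- shared tail of B: end = content.find("\n", pos); slice-splice the new line in
def pvBFinish (c newl : List Char) (pos : Int) : String :=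
  let e := PySem.Chars.findFrom c ['\n'] pos
  if e = -1 then String.ofList (PySem.Chars.slice c none (some pos) ++ newl)
  else String.ofList (PySem.Chars.slice c none (some pos) ++ newl ++ PySem.Chars.slice c (some e) none)

def set_env_value_py_alt (content : String) (key : String) (value : String) : String :=
  let c := content.toList
  let pre := key.toList ++ ['=']                       -- prefix = key + "="
  let newl := pre ++ value.toList                      -- new_line = prefix + value
  if PySem.Chars.startswith c pre then pvBFinish c newl 0
  else
    let p := PySem.Chars.find c ('\n' :: pre)          -- content.find("\n" + prefix)
    if p = -1 then String.ofList (c ++ '\n' :: newl)   -- content + "\n" + new_line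
    else pvBFinish c newl (p + 1)

-- ===== PRECONDITION & SPEC =====
-- Pre_ excludes keys containing a newline whose 'key=' text actually occurs at a line start of content:
-- there A appends (no single split line can start with such a key) while B's cross-line substring search
-- matches and splices — a degenerate corner where both behaviours are accidental.
def Pre_set_env_value_py (content : String) (key : String) (value : String) : Prop :=
  '\n' ∉ key.toList ∨
    (PySem.Str.startswith content (key ++ "=") = false ∧
     PySem.Str.isIn ("\n" ++ key ++ "=") content = false)
instance (content : String) (key : String) (value : String) : Decidable (Pre_set_env_value_py content key value) := by unfold Pre_set_env_value_py; infer_instance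
def pvWitness_set_env_value_py : String × String × String := ("A=1\nB=2", "B", "9")

def Spec_set_env_value_py (content : String) (key : String) (value : String) (out : String) : Prop := out = set_env_value_py_alt content key value
instance (content : String) (key : String) (value : String) (out : String) : Decidable (Spec_set_env_value_py content key value out) := by unfold Spec_set_env_value_py; infer_instance

-- ===== CLAIM (what is proved, stated in full; the proofs are below) =====
def Claim_equal_set_env_value_py : Prop := ∀ (content : String) (key : String) (value : String), Dom_set_env_value_py content key value → Pre_set_env_value_py content key value → Spec_set_env_value_py content key value (set_env_value_py content key value)

-- ===== LEMMAS AND PROOFS =====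

-- reference line splitter on '\n'
def pvSplitNL : List Char → List (List Char)
  | [] => [[]]
  | c :: rest =>
    if c = '\n' then [] :: pvSplitNL rest
    else
      match pvSplitNL rest with
      | [] => [[c]]
      | h :: t => (c :: h) :: t

theorem pvSplitNL_ne_nil (cs : List Char) : pvSplitNL cs ≠ [] := by
  cases cs with
  | nil => simp [pvSplitNL]
  | cons c rest =>
    simp only [pvSplitNL]
    split
    · simp
    · split <;> simp

theorem pv_go_spec (fuel : Nat) : ∀ (l cur : List Char) (acc : List (List Char)),
    l.length < fuel →
    PySem.Chars.splitOn.go ['\n'] fuel l cur acc =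
      acc.reverse ++ (match pvSplitNL l with
        | [] => [cur.reverse]
        | h :: t => (cur.reverse ++ h) :: t) := by
  induction fuel with
  | zero => intro l cur acc h; omega
  | succ fuel ih =>
    intro l cur acc h
    cases l with
    | nil => simp [PySem.Chars.splitOn.go, pvSplitNL]
    | cons c rest =>
      rw [PySem.Chars.splitOn.go]
      by_cases hc : c = '\n'
      · subst hc
        have hpre : List.isPrefixOf ['\n'] ('\n' :: rest) = true := by simp [List.isPrefixOf]
        simp only [hpre, if_pos]
        simp only [List.length_singleton, List.drop_succ_cons, List.drop_zero]
        rw [ih rest [] (cur.reverse :: acc) (by simpa using Nat.lt_of_succ_lt_succ h)]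
        simp only [pvSplitNL]
        cases hs : pvSplitNL rest with
        | nil => exact absurd hs (pvSplitNL_ne_nil rest)
        | cons h2 t2 => simp
      · have hpre : List.isPrefixOf ['\n'] (c :: rest) = false := by
          simp [List.isPrefixOf]; exact fun hh => absurd hh.symm hc
        simp only [hpre, Bool.false_eq_true, if_neg, not_false_iff]
        rw [ih rest (c :: cur) acc (by simpa using Nat.lt_of_succ_lt_succ h)]
        simp only [pvSplitNL, if_neg hc]
        cases hs : pvSplitNL rest with
        | nil => exact absurd hs (pvSplitNL_ne_nil rest)
        | cons h2 t2 => simp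

theorem pv_splitOn_eq (cs : List Char) : PySem.Chars.splitOn cs ['\n'] = pvSplitNL cs := by
  rw [PySem.Chars.splitOn, pv_go_spec (cs.length + 1) cs [] [] (by omega)]
  cases hs : pvSplitNL cs with
  | nil => exact absurd hs (pvSplitNL_ne_nil cs)
  | cons h t => simp

theorem pvSplitNL_no_nl {a : List Char} (h : '\n' ∉ a) : pvSplitNL a = [a] := by
  induction a with
  | nil => rfl
  | cons c rest ih =>
    have hc : c ≠ '\n' := fun hh => h (hh ▸ List.mem_cons_self)
    have h2 : '\n' ∉ rest := fun hh => h (List.mem_cons_of_mem _ hh)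
    simp only [pvSplitNL, if_neg hc, ih h2]

theorem pvSplitNL_break {a : List Char} (b : List Char) (h : '\n' ∉ a) :
    pvSplitNL (a ++ '\n' :: b) = a :: pvSplitNL b := by
  induction a with
  | nil => simp [pvSplitNL]
  | cons c rest ih =>
    have hc : c ≠ '\n' := fun hh => h (hh ▸ List.mem_cons_self)
    have h2 : '\n' ∉ rest := fun hh => h (List.mem_cons_of_mem _ hh)
    simp only [List.cons_append, pvSplitNL, if_neg hc, ih h2]

theorem pv_join_splitNL (b : List Char) : PySem.Chars.join ['\n'] (pvSplitNL b) = b := by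
  induction b with
  | nil => rfl
  | cons c rest ih =>
    by_cases hc : c = '\n'
    · subst hc
      rw [show pvSplitNL ('\n' :: rest) = [] :: pvSplitNL rest from by simp [pvSplitNL]]
      cases hs : pvSplitNL rest with
      | nil => exact absurd hs (pvSplitNL_ne_nil rest)
      | cons h t =>
        rw [PySem.Chars.join_cons_cons]
        rw [hs] at ih
        simpa using ih
    · simp only [pvSplitNL, if_neg hc]
      cases hs : pvSplitNL rest with
      | nil => exact absurd hs (pvSplitNL_ne_nil rest)
      | cons h t =>
        rw [hs] at ih
        cases t with
        | nil => simp only [PySem.Chars.join_singleton] at ih ⊢; simp [ih]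
        | cons h2 t2 =>
          rw [PySem.Chars.join_cons_cons] at ih ⊢
          simp [ih]

-- find = n when there is an occurrence at n and none earlier
theorem pv_find_eq {cs sub : List Char} {n : Nat} (h1 : sub <+: cs.drop n)
    (h2 : ∀ i < n, ¬ sub <+: cs.drop i) : PySem.Chars.find cs sub = n := by
  have hinf : sub <:+: cs := by
    rw [← PySem.Chars.isIn_iff_infix, ← PySem.Chars.exists_prefix_drop_iff_isIn]
    exact ⟨n, h1⟩
  have hnn : 0 ≤ PySem.Chars.find cs sub := (PySem.Chars.find_nonneg_iff cs sub).2 hinf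
  obtain ⟨hp, hmin⟩ := PySem.Chars.find_spec hnn
  have : (PySem.Chars.find cs sub).toNat = n := by
    rcases Nat.lt_trichotomy (PySem.Chars.find cs sub).toNat n with h | h | h
    · exact absurd hp (h2 _ h)
    · exact h
    · exact absurd h1 (hmin _ h)
  omega

theorem pv_find_neg {cs sub : List Char} (h : ∀ i, ¬ sub <+: cs.drop i) :
    PySem.Chars.find cs sub = -1 := by
  rw [PySem.Chars.find_eq_neg_one_iff]
  intro hinf
  obtain ⟨j, hj⟩ := (PySem.Chars.exists_prefix_drop_iff_isIn sub cs).2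
    ((PySem.Chars.isIn_iff_infix sub cs).2 hinf)
  exact h j hj

-- a prefix starting with '\n' cannot occur strictly inside the newline-free part a
theorem pv_no_occ_in_a {a : List Char} (tail : List Char) (ha : '\n' ∉ a) {i : Nat}
    (hi : i < a.length) (sub : List Char) (hh : sub.head? = some '\n') :
    ¬ sub <+: (a ++ tail).drop i := by
  intro hp
  rw [List.drop_append_of_le_length (le_of_lt hi)] at hp
  obtain ⟨t, ht⟩ := hp
  have hne : a.drop i ≠ [] := by simp [List.drop_eq_nil_iff]; omega
  have hhead : (a.drop i ++ tail).head? = ((sub ++ t)).head? := by rw [ht]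
  have h1 : (a.drop i ++ tail).head? = (a.drop i).head? := List.head?_append_of_ne_nil _ hne
  have h2 : (sub ++ t).head? = some '\n' := by
    cases sub with
    | nil => simp at hh
    | cons x xs => simp at hh; simp [hh]
  have : (a.drop i).head? = some '\n' := by rw [← h1, hhead, h2]
  have : '\n' ∈ a.drop i := by
    cases hd : a.drop i with
    | nil => simp [hd] at this
    | cons x xs => rw [hd] at this; simp at this; simp [this]
  exact ha (List.mem_of_mem_drop this)

-- pre <+: a ++ '\n' :: b ↔ pre <+: a, for newline-free pre
theorem pv_prefix_transfer {pre a : List Char} (b : List Char) (hp : '\n' ∉ pre) :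
    pre <+: (a ++ '\n' :: b) ↔ pre <+: a := by
  constructor
  · intro h
    by_cases hl : pre.length ≤ a.length
    · have heq : pre = (a ++ '\n' :: b).take pre.length := List.prefix_iff_eq_take.1 h
      rw [List.take_append_of_le_length hl] at heq
      rw [heq]
      exact List.take_prefix _ _
    · exfalso
      have heq : pre = (a ++ '\n' :: b).take pre.length := List.prefix_iff_eq_take.1 h
      have hlen : a.length < (a ++ '\n' :: b).length := by simp
      have hget : (a ++ '\n' :: b)[a.length] = '\n' := by
        rw [List.getElem_append_right (le_refl _)]
        simp
      have hmem : '\n' ∈ pre := by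
        have hx : pre[a.length]'(by omega) = '\n' := by
          rw [List.IsPrefix.getElem h (by omega)]
          exact hget
        rw [← hx]
        exact List.getElem_mem _
      exact hp hmem
  · intro h
    exact h.trans (List.prefix_append a ('\n' :: b))

-- list-level versions of the two ports
def pvBCore (c newl : List Char) (m : Nat) : List Char :=
  let e := PySem.Chars.find (c.drop m) ['\n']
  if e = -1 then c.take m ++ newl else c.take m ++ newl ++ c.drop (m + e.toNat)

def pvAL (pre newl cs : List Char) : List Char :=
  let r := pvALoop pre newl (pvSplitNL cs)
  PySem.Chars.join ['\n'] (if r.2 then r.1 else r.1 ++ [newl])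

def pvBL (pre newl cs : List Char) : List Char :=
  if PySem.Chars.startswith cs pre then pvBCore cs newl 0
  else if PySem.Chars.find cs ('\n' :: pre) = -1 then cs ++ '\n' :: newl
  else pvBCore cs newl ((PySem.Chars.find cs ('\n' :: pre)).toNat + 1)

theorem pv_portA_eq (content key value : String) :
    set_env_value_py content key value =
      String.ofList (pvAL (key.toList ++ ['=']) (key.toList ++ ['='] ++ value.toList) content.toList) := by
  simp only [set_env_value_py, pvAL, pv_splitOn_eq]

theorem pv_finish_eq (c newl : List Char) (m : Nat) (hm : m ≤ c.length) :
    pvBFinish c newl (m : Int) = String.ofList (pvBCore c newl m) := by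
  unfold pvBFinish pvBCore
  rw [PySem.Chars.findFrom_natCast c ['\n'] m hm]
  set q := PySem.Chars.find (c.drop m) ['\n'] with hq
  by_cases h1 : q = -1
  · simp only [h1, reduceIte]
    congr 2
    simp [PySem.Chars.slice_eq_listSlice, PySem.List.slice_to_natCast]
  · have hq0 : 0 ≤ q := by
      have := PySem.Chars.neg_one_le_find (c.drop m) ['\n']
      rw [← hq] at this
      omega
    have hne : ¬ ((m : Int) + q = -1) := by omega
    simp only [h1, reduceIte, if_neg hne]
    congr 1
    rw [show ((m : Int) + q) = ((m + q.toNat : Nat) : Int) by omega]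
    simp only [PySem.Chars.slice_eq_listSlice]
    rw [PySem.List.slice_from_natCast, PySem.List.slice_to_natCast]

theorem pv_portB_eq (content key value : String) :
    set_env_value_py_alt content key value =
      String.ofList (pvBL (key.toList ++ ['=']) (key.toList ++ ['='] ++ value.toList) content.toList) := by
  unfold set_env_value_py_alt pvBL
  set c := content.toList
  set pre := key.toList ++ ['='] with hpre
  by_cases hs : PySem.Chars.startswith c pre = true
  · simp only [hs, if_pos]
    exact_mod_cast pv_finish_eq c _ 0 (Nat.zero_le _)
  · simp only [hs, Bool.false_eq_true, if_neg, not_false_iff]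
    set p := PySem.Chars.find c ('\n' :: pre) with hp
    by_cases h1 : p = -1
    · simp [h1]
    · have hp0 : 0 ≤ p := by
        have := PySem.Chars.neg_one_le_find c ('\n' :: pre)
        rw [← hp] at this; omega
      have hplen : p.toNat < c.length := by
        obtain ⟨hocc, _⟩ := PySem.Chars.find_spec (s := c) (sub := '\n' :: pre) (by rw [← hp]; exact hp0)
        rw [← hp] at hocc
        have hne : c.drop p.toNat ≠ [] := by
          intro hnil
          rw [hnil] at hocc
          exact absurd (List.prefix_nil.1 hocc) (by simp)
        rw [ne_eq, List.drop_eq_nil_iff] at hne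
        omega
      simp only [h1, reduceIte]
      rw [show p + 1 = ((p.toNat + 1 : Nat) : Int) by omega]
      exact pv_finish_eq c _ (p.toNat + 1) (by omega)

-- shift lemma: pvBCore on a ++ '\n' :: b at offset a.length+1+m is pvBCore on b at m, behind the first line
theorem pv_core_shift (a b newl : List Char) (m : Nat) :
    pvBCore (a ++ '\n' :: b) newl (a.length + 1 + m) = a ++ '\n' :: pvBCore b newl m := by
  unfold pvBCore
  have hdrop : ∀ k : Nat, (a ++ '\n' :: b).drop (a.length + 1 + k) = b.drop k := by
    intro k
    rw [show a.length + 1 + k = a.length + (1 + k) by omega, List.drop_append]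
    rw [List.drop_eq_nil_of_le (by omega), show 1 + k = k + 1 by omega]
    simp
  have htake : (a ++ '\n' :: b).take (a.length + 1 + m) = a ++ '\n' :: b.take m := by
    rw [show a.length + 1 + m = a.length + (1 + m) by omega, List.take_append]
    rw [List.take_of_length_le (by omega), show 1 + m = m + 1 by omega]
    simp
  rw [hdrop m, htake]
  set q := PySem.Chars.find (b.drop m) ['\n']
  by_cases h1 : q = -1
  · simp [h1]
  · simp only [h1, reduceIte]
    rw [show a.length + 1 + m + q.toNat = a.length + 1 + (m + q.toNat) by omega, hdrop]
    simp

theorem pv_join_cons (a : List Char) {X : List (List Char)} (hX : X ≠ []) :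
    PySem.Chars.join ['\n'] (a :: X) = a ++ '\n' :: PySem.Chars.join ['\n'] X := by
  cases X with
  | nil => exact absurd rfl hX
  | cons h t => rw [PySem.Chars.join_cons_cons]; simp

theorem pvALoop_fst_length (pre newl : List Char) (L : List (List Char)) :
    (pvALoop pre newl L).1.length = L.length := by
  induction L with
  | nil => rfl
  | cons l ls ih =>
    simp only [pvALoop]
    split
    · simp
    · simpa using ih

-- A-side recurrence: a non-matching first line passes through
theorem pv_AL_step {pre a : List Char} (newl b : List Char) (ha : '\n' ∉ a)
    (hns : PySem.Chars.startswith a pre = false) :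
    pvAL pre newl (a ++ '\n' :: b) = a ++ '\n' :: pvAL pre newl b := by
  unfold pvAL
  rw [pvSplitNL_break b ha]
  simp only [pvALoop, hns, Bool.false_eq_true, if_neg, not_false_iff]
  set r := pvALoop pre newl (pvSplitNL b) with hr
  have hr1 : r.1 ≠ [] := by
    have := pvALoop_fst_length pre newl (pvSplitNL b)
    rw [← hr] at this
    intro hnil
    rw [hnil] at this
    exact pvSplitNL_ne_nil b (List.length_eq_zero_iff.1 this.symm)
  by_cases h2 : r.2
  · simp only [h2, if_pos]
    exact pv_join_cons a hr1
  · simp only [h2, Bool.false_eq_true, if_neg, not_false_iff, List.cons_append]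
    exact pv_join_cons a (by simp)

theorem pv_drop_shift (a b : List Char) (k : Nat) :
    (a ++ '\n' :: b).drop (a.length + 1 + k) = b.drop k := by
  rw [show a.length + 1 + k = a.length + (1 + k) by omega, List.drop_append]
  rw [List.drop_eq_nil_of_le (by omega), show 1 + k = k + 1 by omega]
  simp

-- every input is a newline-free string, or a newline-free first line plus a rest
theorem pv_decomp (cs : List Char) :
    '\n' ∉ cs ∨ ∃ a b, cs = a ++ '\n' :: b ∧ '\n' ∉ a := by
  induction cs with
  | nil => left; simp
  | cons c rest ih =>
    by_cases hc : c = '\n'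
    · right; exact ⟨[], rest, by simp [hc], by simp⟩
    · rcases ih with h | ⟨a, b, rfl, ha⟩
      · left
        intro hm
        rcases List.mem_cons.1 hm with h1 | h1
        · exact hc h1.symm
        · exact h h1
      · right
        refine ⟨c :: a, b, by simp, ?_⟩
        intro hm
        rcases List.mem_cons.1 hm with h1 | h1
        · exact hc h1.symm
        · exact ha h1

-- no newline at all: A rejoins one line, B finds nothing past it
theorem pv_main_nonl (pre newl : List Char) {cs : List Char} (hcs : '\n' ∉ cs) :
    pvAL pre newl cs = pvBL pre newl cs := by
  have hno : ∀ (extra : List Char) (i : Nat), ¬ ('\n' :: extra) <+: cs.drop i := by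
    intro extra i hpf
    obtain ⟨t, ht⟩ := hpf
    have : '\n' ∈ cs.drop i := by rw [← ht]; simp
    exact hcs (List.mem_of_mem_drop this)
  unfold pvAL pvBL
  rw [pvSplitNL_no_nl hcs]
  by_cases hs : PySem.Chars.startswith cs pre = true
  · simp only [pvALoop, hs, if_pos, PySem.Chars.join_singleton, pvBCore, List.drop_zero]
    rw [pv_find_neg (sub := ['\n']) (by simpa using hno [])]
    simp
  · simp only [pvALoop, hs, Bool.false_eq_true, if_neg, not_false_iff]
    rw [pv_find_neg (sub := '\n' :: pre) (hno pre)]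
    simp only [reduceIte]
    rw [show [cs] ++ [newl] = [cs, newl] from rfl]
    rw [PySem.Chars.join_cons_cons, PySem.Chars.join_singleton]
    simp

-- B-side recurrence: a non-matching newline-free first line passes through
theorem pv_BL_step {pre a : List Char} (newl b : List Char) (hp : '\n' ∉ pre)
    (ha : '\n' ∉ a) (hsa : PySem.Chars.startswith a pre = false) :
    pvBL pre newl (a ++ '\n' :: b) = a ++ '\n' :: pvBL pre newl b := by
  have hscs : PySem.Chars.startswith (a ++ '\n' :: b) pre = false := by
    rw [← Bool.not_eq_true, PySem.Chars.startswith_iff, pv_prefix_transfer b hp]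
    rw [← PySem.Chars.startswith_iff _ _, hsa]
    simp
  have hdrop_nl : (a ++ '\n' :: b).drop a.length = '\n' :: b := by
    rw [List.drop_append_of_le_length (le_refl _)]
    simp
  unfold pvBL
  rw [hscs]
  simp only [Bool.false_eq_true, if_neg, not_false_iff]
  by_cases hsb : PySem.Chars.startswith b pre = true
  · -- first occurrence is at the boundary: p = a.length
    have hfind : PySem.Chars.find (a ++ '\n' :: b) ('\n' :: pre) = (a.length : Int) := by
      apply pv_find_eq
      · rw [hdrop_nl]
        exact List.cons_prefix_cons.2 ⟨rfl, (PySem.Chars.startswith_iff _ _).1 hsb⟩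
      · intro i hi
        exact pv_no_occ_in_a _ ha hi _ rfl
    rw [hfind, hsb]
    simp only [reduceIte]
    have : ¬ ((a.length : Int) = -1) := by omega
    rw [if_neg this]
    rw [show (a.length : Int).toNat + 1 = a.length + 1 + 0 by omega, pv_core_shift]
  · have hsb' : PySem.Chars.startswith b pre = false := by simpa using hsb
    rw [hsb']
    simp only [Bool.false_eq_true, if_neg, not_false_iff]
    have hbound : ¬ ('\n' :: pre) <+: ('\n' :: b) := by
      intro hpf
      rcases List.cons_prefix_cons.1 hpf with ⟨_, hpb⟩
      exact hsb ((PySem.Chars.startswith_iff _ _).2 hpb)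
    set q := PySem.Chars.find b ('\n' :: pre) with hq
    by_cases h1 : q = -1
    · have hnone : ∀ k, ¬ ('\n' :: pre) <+: b.drop k := by
        intro k hpf
        have : ('\n' :: pre) <:+: b := by
          rw [← PySem.Chars.isIn_iff_infix, ← PySem.Chars.exists_prefix_drop_iff_isIn]
          exact ⟨k, hpf⟩
        exact (PySem.Chars.find_eq_neg_one_iff b ('\n' :: pre)).1 (hq ▸ h1) this
      have hfind : PySem.Chars.find (a ++ '\n' :: b) ('\n' :: pre) = -1 := by
        apply pv_find_neg
        intro i hpf
        rcases Nat.lt_trichotomy i a.length with hlt | heq | hgt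
        · exact pv_no_occ_in_a _ ha hlt _ rfl hpf
        · rw [heq, hdrop_nl] at hpf
          exact hbound hpf
        · have : i = a.length + 1 + (i - a.length - 1) := by omega
          rw [this, pv_drop_shift] at hpf
          exact hnone _ hpf
      rw [hfind, h1]
      simp
    · have hq0 : 0 ≤ q := by
        have := PySem.Chars.neg_one_le_find b ('\n' :: pre)
        rw [← hq] at this; omega
      obtain ⟨hocc, hmin⟩ := PySem.Chars.find_spec (s := b) (sub := '\n' :: pre) (hq ▸ hq0)
      rw [← hq] at hocc hmin
      have hfind : PySem.Chars.find (a ++ '\n' :: b) ('\n' :: pre) = ((a.length + 1 + q.toNat : Nat) : Int) := by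
        apply pv_find_eq
        · rw [pv_drop_shift]
          exact hocc
        · intro i hi hpf
          rcases Nat.lt_trichotomy i a.length with hlt | heq | hgt
          · exact pv_no_occ_in_a _ ha hlt _ rfl hpf
          · rw [heq, hdrop_nl] at hpf
            exact hbound hpf
          · have hieq : i = a.length + 1 + (i - a.length - 1) := by omega
            rw [hieq, pv_drop_shift] at hpf
            exact hmin _ (by omega) hpf
      rw [hfind]
      have hne : ¬ (((a.length + 1 + q.toNat : Nat) : Int) = -1) := by omega
      rw [if_neg hne]
      simp only [Int.toNat_natCast]
      rw [show a.length + 1 + q.toNat + 1 = a.length + 1 + (q.toNat + 1) by omega, pv_core_shift]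
      rw [if_neg h1]

-- matching first line: A replaces it, B splices at the front
theorem pv_main_hit {pre a : List Char} (newl b : List Char) (hp : '\n' ∉ pre)
    (ha : '\n' ∉ a) (hsa : PySem.Chars.startswith a pre = true) :
    pvAL pre newl (a ++ '\n' :: b) = pvBL pre newl (a ++ '\n' :: b) := by
  have hdrop_nl : (a ++ '\n' :: b).drop a.length = '\n' :: b := by
    rw [List.drop_append_of_le_length (le_refl _)]
    simp
  have hscs : PySem.Chars.startswith (a ++ '\n' :: b) pre = true := by
    rw [PySem.Chars.startswith_iff _ _, pv_prefix_transfer b hp]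
    exact (PySem.Chars.startswith_iff _ _).1 hsa
  unfold pvAL pvBL
  rw [pvSplitNL_break b ha, hscs]
  simp only [pvALoop, hsa, if_pos]
  rw [pv_join_cons newl (pvSplitNL_ne_nil b), pv_join_splitNL]
  unfold pvBCore
  have hfind : PySem.Chars.find ((a ++ '\n' :: b).drop 0) ['\n'] = (a.length : Int) := by
    rw [List.drop_zero]
    apply pv_find_eq
    · rw [hdrop_nl]
      exact ⟨b, rfl⟩
    · intro i hi
      exact pv_no_occ_in_a _ ha hi _ rfl
  rw [hfind]
  have : ¬ ((a.length : Int) = -1) := by omega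
  rw [if_neg this]
  simp [hdrop_nl]

-- the main equivalence, at the list level
theorem pv_main (pre newl : List Char) (hp : '\n' ∉ pre) (cs : List Char) :
    pvAL pre newl cs = pvBL pre newl cs := by
  have H : ∀ (n : Nat) (cs : List Char), cs.length ≤ n → pvAL pre newl cs = pvBL pre newl cs := by
    intro n
    induction n with
    | zero =>
      intro cs hlen
      have : cs = [] := List.length_eq_zero_iff.1 (Nat.le_zero.1 hlen)
      subst this
      exact pv_main_nonl pre newl (by simp)
    | succ n ih =>
      intro cs hlen
      rcases pv_decomp cs with h | ⟨a, b, rfl, ha⟩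
      · exact pv_main_nonl pre newl h
      · by_cases hsa : PySem.Chars.startswith a pre = true
        · exact pv_main_hit newl b hp ha hsa
        · rw [pv_AL_step newl b ha (Bool.not_eq_true _ ▸ hsa),
              pv_BL_step newl b hp ha (Bool.not_eq_true _ ▸ hsa)]
          rw [ih b (by simp at hlen; omega)]
  exact H cs.length cs (le_refl _)

-- every piece produced by the splitter is newline-free
theorem pv_splitNL_no_nl_mem (cs : List Char) : ∀ l ∈ pvSplitNL cs, '\n' ∉ l := by
  induction cs with
  | nil => intro l hl; simp [pvSplitNL] at hl; simp [hl]
  | cons c rest ih =>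
    intro l hl
    by_cases hc : c = '\n'
    · subst hc
      rw [show pvSplitNL ('\n' :: rest) = [] :: pvSplitNL rest from by simp [pvSplitNL]] at hl
      rcases List.mem_cons.1 hl with h | h
      · simp [h]
      · exact ih l h
    · simp only [pvSplitNL, if_neg hc] at hl
      cases hs : pvSplitNL rest with
      | nil => exact absurd hs (pvSplitNL_ne_nil rest)
      | cons h t =>
        rw [hs] at hl
        rcases List.mem_cons.1 hl with h1 | h1
        · subst h1
          intro hm
          rcases List.mem_cons.1 hm with h2 | h2
          · exact hc h2.symm
          · exact ih h (hs ▸ List.mem_cons_self) h2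
        · exact ih l (hs ▸ List.mem_cons_of_mem _ h1)

-- a loop over lines none of which matches returns them unchanged, found = false
theorem pv_loop_nomatch (pre newl : List Char) (L : List (List Char))
    (h : ∀ l ∈ L, PySem.Chars.startswith l pre = false) : pvALoop pre newl L = (L, false) := by
  induction L with
  | nil => rfl
  | cons l ls ih =>
    simp only [pvALoop, h l List.mem_cons_self, Bool.false_eq_true, if_neg, not_false_iff]
    rw [ih (fun x hx => h x (List.mem_cons_of_mem _ hx))]

theorem pv_join_append_one (newl : List Char) (L : List (List Char)) (hL : L ≠ []) :
    PySem.Chars.join ['\n'] (L ++ [newl]) = PySem.Chars.join ['\n'] L ++ '\n' :: newl := by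
  induction L with
  | nil => exact absurd rfl hL
  | cons l ls ih =>
    cases ls with
    | nil =>
      rw [show ([l] : List (List Char)) ++ [newl] = [l, newl] from rfl,
          PySem.Chars.join_cons_cons, PySem.Chars.join_singleton, PySem.Chars.join_singleton]
      simp
    | cons l2 t2 =>
      rw [show (l :: l2 :: t2) ++ [newl] = l :: ((l2 :: t2) ++ [newl]) from rfl,
          PySem.Chars.join_cons_cons]
      rw [show (l2 :: t2) ++ [newl] = l2 :: (t2 ++ [newl]) from rfl]
      rw [show PySem.Chars.join ['\n'] (l :: l2 :: (t2 ++ [newl])) =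
            l ++ ['\n'] ++ PySem.Chars.join ['\n'] (l2 :: (t2 ++ [newl])) from
        PySem.Chars.join_cons_cons _ _ _ _]
      rw [show l2 :: (t2 ++ [newl]) = (l2 :: t2) ++ [newl] from rfl, ih (by simp)]
      simp

-- a key containing a newline matches no line: A appends
theorem pv_AL_append {pre : List Char} (newl cs : List Char) (hpnl : '\n' ∈ pre) :
    pvAL pre newl cs = cs ++ '\n' :: newl := by
  unfold pvAL
  rw [pv_loop_nomatch pre newl (pvSplitNL cs) (by
    intro l hl
    rw [← Bool.not_eq_true, PySem.Chars.startswith_iff]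
    intro hpf
    exact pv_splitNL_no_nl_mem cs l hl (hpf.mem hpnl))]
  simp only [Bool.false_eq_true, if_neg, not_false_iff]
  rw [pv_join_append_one newl (pvSplitNL cs) (pvSplitNL_ne_nil cs), pv_join_splitNL]

-- the degenerate-key case admitted by Pre_'s second disjunct: both ports append
theorem pv_main_nlkey (pre newl cs : List Char) (hpnl : '\n' ∈ pre)
    (hsw : PySem.Chars.startswith cs pre = false)
    (hin : PySem.Chars.isIn ('\n' :: pre) cs = false) :
    pvAL pre newl cs = pvBL pre newl cs := by
  rw [pv_AL_append newl cs hpnl]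
  unfold pvBL
  rw [hsw]
  simp only [Bool.false_eq_true, if_neg, not_false_iff]
  rw [(PySem.Chars.find_eq_neg_one_iff cs ('\n' :: pre)).2
      (PySem.Chars.isIn_eq_false_iff _ _ |>.1 hin)]
  simp

-- ===== VERDICT (by name: the statement is the Claim_ definition above) =====
theorem set_env_value_py_spec : Claim_equal_set_env_value_py := by
  intro content key value _hd hpre
  unfold Spec_set_env_value_py
  rw [pv_portA_eq, pv_portB_eq]
  congr 1
  by_cases hk : '\n' ∈ key.toList
  · rcases hpre with hk' | ⟨hsw, hin⟩
    · exact absurd hk hk'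
    · apply pv_main_nlkey
      · exact List.mem_append.2 (Or.inl hk)
      · rw [PySem.Str.startswith] at hsw
        rw [show (key ++ "=").toList = key.toList ++ ['='] by simp] at hsw
        exact hsw
      · rw [PySem.Str.isIn] at hin
        rw [show ("\n" ++ key ++ "=").toList = '\n' :: (key.toList ++ ['=']) by simp] at hin
        exact hin
  · apply pv_main
    intro hmem
    rcases List.mem_append.1 hmem with h | h
    · exact hk h
    · simp at h
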